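-- pv_equiv track=rewrite | github.com/adityapolisetty/IB---Corporate-Finance-2025 | interactive.py | detect_pattern_type
-- ===== SOURCE A (Python) =====
-- def detect_pattern_type(cashflows):
--     """
--     Detect the pattern type based on cashflow signs.
--     Returns: 'investment', 'financing', or 'mixed'
--     """
--     if len(cashflows) < 2:
--         return 'mixed'
--
--     # Count sign changes
--     sign_changes = 0
--     for i in range(1, len(cashflows)):
--         if (cashflows[i-1] >= 0 and cashflows[i] < 0) or (cashflows[i-1] < 0 and cashflows[i] >= 0):
--             sign_changes += 1
--
--     # Investment pattern: negative first, then positive (one sign change at start)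
--     if cashflows[0] < 0 and all(cf >= 0 for cf in cashflows[1:]):
--         return 'investment'
--
--     # Financing pattern: positive first, then negative (one sign change at end)
--     if cashflows[0] > 0 and all(cf >= 0 for cf in cashflows[:-1]) and cashflows[-1] < 0:
--         return 'financing'
--
--     # Multiple sign changes indicate potential multiple IRRs
--     if sign_changes > 1:
--         return 'mixed'
--
--     return 'mixed'
-- ===== SOURCE B (Python) =====
-- def detect_pattern_type(cashflows):
--     if len(cashflows) < 2:
--         return 'mixed'
--     neg = [i for i, cf in enumerate(cashflows) if cf < 0]
--     if neg == [0]: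
--         return 'investment'
--     if neg == [len(cashflows) - 1] and cashflows[0] > 0:
--         return 'financing'
--     return 'mixed'
-- ===== Notes on version B (the rewrite author's own statement) =====
-- stated objective: simpler
-- what changed: B builds the list of negative positions once and classifies by its shape (neg == [0] / neg == [n-1]), dropping A's dead sign-change counter and its two all()-scans over slices.
import Mathlib
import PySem

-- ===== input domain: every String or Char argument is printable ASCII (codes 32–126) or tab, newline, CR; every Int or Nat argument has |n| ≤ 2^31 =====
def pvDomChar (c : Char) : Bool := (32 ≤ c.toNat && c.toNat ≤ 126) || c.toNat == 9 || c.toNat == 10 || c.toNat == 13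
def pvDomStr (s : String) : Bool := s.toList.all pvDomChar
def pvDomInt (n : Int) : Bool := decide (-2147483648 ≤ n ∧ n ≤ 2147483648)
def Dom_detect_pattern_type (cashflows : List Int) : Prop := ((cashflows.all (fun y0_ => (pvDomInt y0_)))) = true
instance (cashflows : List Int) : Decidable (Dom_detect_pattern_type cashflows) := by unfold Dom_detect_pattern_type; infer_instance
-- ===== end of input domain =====

-- B classifies by the list of negative positions instead of A's slice scans; objective: simpler. Total; equal on all inputs.

-- ===== PORT A =====
def detect_pattern_type (cashflows : List Int) : String :=
  if PySem.List.len cashflows < 2 then "mixed"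
  else
    -- dead in A too, kept for faithfulness
    let _sign_changes : Int :=
      (PySem.List.pyRange 1 (PySem.List.len cashflows) 1).foldl
        (fun acc i =>
          if (0 ≤ PySem.List.pyGetD cashflows (i - 1) 0 ∧ PySem.List.pyGetD cashflows i 0 < 0) ∨
             (PySem.List.pyGetD cashflows (i - 1) 0 < 0 ∧ 0 ≤ PySem.List.pyGetD cashflows i 0)
          then acc + 1 else acc) 0
    if PySem.List.pyGetD cashflows 0 0 < 0 ∧
       (PySem.List.slice cashflows (some 1) none).all (fun cf => decide (0 ≤ cf)) then
      "investment"
    else if 0 < PySem.List.pyGetD cashflows 0 0 ∧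
            (PySem.List.slice cashflows none (some (-1))).all (fun cf => decide (0 ≤ cf)) ∧
            PySem.List.pyGetD cashflows (-1) 0 < 0 then
      "financing"
    else if 1 < _sign_changes then "mixed"
    else "mixed"

-- ===== PORT B =====
-- [i for i, cf in enumerate(cashflows) if cf < 0], with the running enumerate index
def negIdxFrom (i : Nat) : List Int → List Nat
  | [] => []
  | x :: xs => if x < 0 then i :: negIdxFrom (i + 1) xs else negIdxFrom (i + 1) xs

def detect_pattern_type_alt (cashflows : List Int) : String :=
  if PySem.List.len cashflows < 2 then "mixed"
  else
    let neg := negIdxFrom 0 cashflows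
    if neg = [0] then "investment"
    else if neg = [cashflows.length - 1] ∧ 0 < PySem.List.pyGetD cashflows 0 0 then "financing"
    else "mixed"

-- ===== PRECONDITION & SPEC =====
def Spec_detect_pattern_type (cashflows : List Int) (out : String) : Prop := out = detect_pattern_type_alt cashflows
instance (cashflows : List Int) (out : String) : Decidable (Spec_detect_pattern_type cashflows out) := by unfold Spec_detect_pattern_type; infer_instance

-- ===== CLAIM (what is proved, stated in full; the proofs are below) =====
def Claim_equal_detect_pattern_type : Prop := ∀ (cashflows : List Int), Dom_detect_pattern_type cashflows → Spec_detect_pattern_type cashflows (detect_pattern_type cashflows)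

-- ===== LEMMAS AND PROOFS =====

theorem negIdxFrom_cons (i : Nat) (x : Int) (xs : List Int) :
    negIdxFrom i (x :: xs) = if x < 0 then i :: negIdxFrom (i + 1) xs else negIdxFrom (i + 1) xs := rfl

theorem negIdxFrom_eq_nil_iff (i : Nat) (xs : List Int) :
    negIdxFrom i xs = [] ↔ xs.all (fun cf => decide (0 ≤ cf)) = true := by
  induction xs generalizing i with
  | nil => simp [negIdxFrom]
  | cons x xs ih =>
    rw [negIdxFrom_cons]
    simp only [List.all_cons, Bool.and_eq_true, decide_eq_true_eq]
    split_ifs with hx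
    · simp only [false_iff]
      intro h; omega
    · rw [ih]; constructor
      · intro h; exact ⟨by omega, h⟩
      · intro h; exact h.2

theorem mem_negIdxFrom_ge {j i : Nat} {xs : List Int} (h : j ∈ negIdxFrom i xs) : i ≤ j := by
  induction xs generalizing i with
  | nil => simp [negIdxFrom] at h
  | cons x xs ih =>
    rw [negIdxFrom_cons] at h
    split_ifs at h with hx
    · rcases List.mem_cons.mp h with h | h
      · omega
      · have := ih h; omega
    · have := ih h; omega

theorem negIdxFrom_singleton_head_iff (i : Nat) (x : Int) (xs : List Int) :
    negIdxFrom i (x :: xs) = [i] ↔ (x < 0 ∧ xs.all (fun cf => decide (0 ≤ cf)) = true) := by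
  rw [negIdxFrom_cons]
  split_ifs with hx
  · simp [hx, negIdxFrom_eq_nil_iff]
  · constructor
    · intro h
      have hm : i ∈ negIdxFrom (i + 1) xs := by rw [h]; exact List.mem_singleton.mpr rfl
      have := mem_negIdxFrom_ge hm; omega
    · intro h; exact absurd h.1 hx

theorem negIdxFrom_singleton_last_iff (i : Nat) (x : Int) (xs : List Int) :
    negIdxFrom i (x :: xs) = [i + (x :: xs).length - 1] ↔
      ((x :: xs).dropLast.all (fun cf => decide (0 ≤ cf)) = true ∧
        (x :: xs).getLast (by simp) < 0) := by
  induction xs generalizing i x with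
  | nil =>
    rw [negIdxFrom_cons]
    have hl : i + ([x] : List Int).length - 1 = i := by simp
    rw [hl]
    split_ifs with hx
    · simp [negIdxFrom, hx]
    · simp only [negIdxFrom, List.dropLast, List.all_nil, List.getLast_singleton, true_and]
      constructor
      · intro h; exact absurd h (by simp)
      · intro h; exact absurd h hx
  | cons y ys ih =>
    rw [negIdxFrom_cons]
    have hd : (x :: y :: ys).dropLast = x :: (y :: ys).dropLast :=
      List.dropLast_cons_of_ne_nil (by simp)
    have hg : (x :: y :: ys).getLast (by simp) = (y :: ys).getLast (by simp) :=
      List.getLast_cons (by simp)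
    split_ifs with hx
    · constructor
      · intro h
        exfalso
        rw [List.cons.injEq] at h
        have h1 := h.1
        simp only [List.length_cons] at h1
        omega
      · intro h
        exfalso
        have h1 := h.1
        rw [hd, List.all_cons] at h1
        have : (0 : Int) ≤ x := by
          have := (Bool.and_eq_true _ _).mp h1 |>.1
          exact of_decide_eq_true this
        omega
    · have harith : i + (x :: y :: ys).length - 1 = (i + 1) + (y :: ys).length - 1 := by
        simp only [List.length_cons]; omega
      rw [harith, ih (i + 1) y, hd, hg]
      rw [List.all_cons]
      simp only [Bool.and_eq_true, decide_eq_true_eq]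
      constructor
      · rintro ⟨h1, h2⟩; exact ⟨⟨by omega, h1⟩, h2⟩
      · rintro ⟨⟨_, h1⟩, h2⟩; exact ⟨h1, h2⟩

-- ===== VERDICT (by name: the statement is the Claim_ definition above) =====
theorem detect_pattern_type_spec : Claim_equal_detect_pattern_type := by
  intro cashflows _
  unfold Spec_detect_pattern_type detect_pattern_type detect_pattern_type_alt
  match cashflows with
  | [] => rfl
  | [x] => rfl
  | a :: b :: t =>
    have hlen : ¬ PySem.List.len (a :: b :: t) < 2 := by
      simp only [PySem.List.len_eq, List.length_cons]; omega
    simp only [hlen, if_false]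
    have h0 : PySem.List.pyGetD (a :: b :: t) 0 0 = a := PySem.List.pyGetD_zero_cons _ _ _
    have h1 : PySem.List.slice (a :: b :: t) (some 1) none = b :: t := by
      rw [PySem.List.slice_from_one]; rfl
    have h2 : PySem.List.slice (a :: b :: t) none (some (-1)) = (a :: b :: t).dropLast :=
      PySem.List.slice_to_neg_one _
    have h3 : PySem.List.pyGetD (a :: b :: t) (-1) 0 = (a :: b :: t).getLast (by simp) :=
      PySem.List.pyGetD_neg_one _ _ (by simp)
    rw [h0, h1, h2, h3]
    have hinv := negIdxFrom_singleton_head_iff 0 a (b :: t)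
    have hfin := negIdxFrom_singleton_last_iff 0 a (b :: t)
    have hl : (0 : Nat) + (a :: b :: t).length - 1 = (a :: b :: t).length - 1 := by omega
    rw [hl] at hfin
    by_cases hI : a < 0 ∧ (b :: t).all (fun cf => decide (0 ≤ cf)) = true
    · rw [if_pos hI, if_pos (hinv.mpr hI)]
    · rw [if_neg hI, if_neg (fun h => hI (hinv.mp h))]
      by_cases hF : 0 < a ∧ (a :: b :: t).dropLast.all (fun cf => decide (0 ≤ cf)) = true ∧
          (a :: b :: t).getLast (by simp) < 0
      · rw [if_pos hF, if_pos ⟨hfin.mpr ⟨hF.2.1, hF.2.2⟩, hF.1⟩]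
      · rw [if_neg hF,
            if_neg (fun h : negIdxFrom 0 (a :: b :: t) = [(a :: b :: t).length - 1] ∧ 0 < a =>
              hF ⟨h.2, (hfin.mp h.1).1, (hfin.mp h.1).2⟩)]
        split_ifs <;> rfl
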